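-- pv_equiv track=rewrite | github.com/JKuren/DataMining2_group4 | Assignment 2/code skeleton.py | sort_and_cut_transactions
-- ===== SOURCE A (Python) =====
-- def sort_and_cut_transactions(transactions, freq_items):
--     sorted_cutted_transactions = []
--     freq_items = list(freq_items)
--
--     order_dict = { tag : i for i,tag in enumerate(freq_items) }
--
--     for i in transactions:
--         temp_dict = {}
--         for j in i:
--             if j in freq_items:
--                 temp_dict[j] = order_dict[j]
--                 temp_dict = dict(sorted(temp_dict.items(), key=lambda item: item[1]))
--         sorted_cutted_transactions.append(list(temp_dict))
--
--     return sorted_cutted_transactions  # output type: list of list of chars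
-- ===== SOURCE B (Python) =====
-- def sort_and_cut_transactions(transactions, freq_items):
--     # frequency order with duplicates removed, keeping the LAST occurrence of each tag
--     order = list(dict.fromkeys(reversed(freq_items)))[::-1]
--     result = []
--     for t in transactions:
--         present = set(t)
--         result.append([tag for tag in order if tag in present])
--     return result
-- ===== Notes on version B (the rewrite author's own statement) =====
-- stated objective: faster
-- what changed: Instead of testing each transaction item against freq_items by linear scan and re-sorting the accumulating dict after every insertion, B deduplicates freq_items once (keeping last occurrences, which is exactly the order A's overwriting order_dict induces) and emits, per transaction, the deduped freq_items filtered by set membership in that transaction - no order dictionary and no sorting at all.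
import Mathlib
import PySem

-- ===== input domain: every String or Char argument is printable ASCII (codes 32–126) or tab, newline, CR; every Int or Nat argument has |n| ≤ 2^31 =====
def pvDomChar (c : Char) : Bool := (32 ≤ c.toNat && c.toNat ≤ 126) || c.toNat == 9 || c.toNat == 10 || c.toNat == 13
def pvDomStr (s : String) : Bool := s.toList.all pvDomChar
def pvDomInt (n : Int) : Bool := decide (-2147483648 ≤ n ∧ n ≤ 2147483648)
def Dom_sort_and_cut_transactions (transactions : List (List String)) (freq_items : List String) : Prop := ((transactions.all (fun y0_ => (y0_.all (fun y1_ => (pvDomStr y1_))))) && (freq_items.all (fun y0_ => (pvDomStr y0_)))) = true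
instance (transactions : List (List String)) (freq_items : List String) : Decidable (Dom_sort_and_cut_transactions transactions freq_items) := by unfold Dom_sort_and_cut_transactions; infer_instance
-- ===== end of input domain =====

-- B replaces A's per-item linear scans of freq_items and per-insertion re-sort by a single
-- last-occurrence dedup of freq_items followed by a membership filter per transaction.

-- ===== PORT A =====
def sort_and_cut_transactions (transactions : List (List String)) (freq_items : List String) : List (List String) :=
  -- order_dict = { tag : i for i,tag in enumerate(freq_items) }
  let order_dict : PySem.Dict String Int :=
    (PySem.List.enumerate freq_items 0).foldl (fun d p => d.insert p.2 p.1) PySem.Dict.empty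
  transactions.foldl (fun acc i =>
    acc ++ [(i.foldl (fun td j =>
      if freq_items.contains j then
        -- the guard 'j in freq_items' guarantees the key is present, so order_dict[j]
        -- never raises; getD is exact on every reachable lookup
        PySem.Dict.ofList
          (PySem.List.sorted (td.insert j (order_dict.getD j 0)).items (fun p => p.2))
      else td) PySem.Dict.empty).keys]) []

-- ===== PORT B =====
def sort_and_cut_transactions_alt (transactions : List (List String)) (freq_items : List String) : List (List String) :=
  -- order = list(dict.fromkeys(reversed(freq_items)))[::-1]
  let order := (PySem.List.dedup freq_items.reverse).reverse
  transactions.foldl (fun res t =>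
    let present := PySem.Set.ofList t
    res ++ [order.filter (fun tag => PySem.Set.contains present tag)]) []

-- ===== PRECONDITION & SPEC =====
def Spec_sort_and_cut_transactions (transactions : List (List String)) (freq_items : List String) (out : List (List String)) : Prop := out = sort_and_cut_transactions_alt transactions freq_items
instance (transactions : List (List String)) (freq_items : List String) (out : List (List String)) : Decidable (Spec_sort_and_cut_transactions transactions freq_items out) := by unfold Spec_sort_and_cut_transactions; infer_instance

-- ===== CLAIM (what is proved, stated in full; the proofs are below) =====
def Claim_equal_sort_and_cut_transactions : Prop := ∀ (transactions : List (List String)) (freq_items : List String), Dom_sort_and_cut_transactions transactions freq_items → Spec_sort_and_cut_transactions transactions freq_items (sort_and_cut_transactions transactions freq_items)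

-- ===== LEMMAS AND PROOFS =====

-- A's order_dict, as the enumerate fold builds it
def pvOdict (fi : List String) : PySem.Dict String Int :=
  (PySem.List.enumerate fi 0).foldl (fun d p => d.insert p.2 p.1) PySem.Dict.empty

-- B's frequency-order list: freq_items deduplicated keeping last occurrences
def pvOrder (fi : List String) : List String := (PySem.List.dedup fi.reverse).reverse

-- dict(pairs) with pairwise-distinct keys keeps the pair list as given
lemma pvItems_ofList {ν : Type} (l : List (String × ν)) (h : (l.map (·.1)).Nodup) :
    (PySem.Dict.ofList l).items = l := by
  rw [PySem.Dict.ofList, PySem.Dict.update]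
  rw [PySem.Dict.items_foldl_insert_fresh l (·.1) (·.2) PySem.Dict.empty
    (by intro a _; rfl) h]
  simp [PySem.Dict.empty]

lemma pvOdict_snoc (r' : List String) (x : String) :
    pvOdict (r'.reverse ++ [x]) = (pvOdict r'.reverse).insert x (r'.length : Int) := by
  rw [pvOdict, PySem.List.enumerate_append, List.foldl_append]
  simp [PySem.List.enumerate_cons, PySem.List.enumerate_nil, pvOdict]

-- order_dict of r.reverse: values strictly decrease along dedup r and are < |r|
lemma pvOdict_rev (r : List String) :
    (∀ g ∈ r, (pvOdict r.reverse).getD g 0 < (r.length : Int)) ∧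
    (PySem.List.dedup r).Pairwise
      (fun a b => (pvOdict r.reverse).getD b 0 < (pvOdict r.reverse).getD a 0) := by
  induction r with
  | nil => simp [PySem.List.dedup_eq_ofList, PySem.Set.ofList_nil]
  | cons x r' ih =>
    have hrew : pvOdict (x :: r').reverse = (pvOdict r'.reverse).insert x (r'.length : Int) := by
      rw [List.reverse_cons, pvOdict_snoc]
    rw [hrew]
    constructor
    · intro g hg
      rcases List.mem_cons.mp hg with rfl | hg'
      · rw [PySem.Dict.getD_insert_self]
        simp only [List.length_cons]; push_cast; omega
      · by_cases hgx : g = x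
        · subst hgx
          rw [PySem.Dict.getD_insert_self]
          simp only [List.length_cons]; push_cast; omega
        · rw [PySem.Dict.getD_insert_of_ne _ _ _ hgx]
          have := ih.1 g hg'
          simp only [List.length_cons]; push_cast; omega
    · rw [PySem.List.dedup_eq_ofList, PySem.Set.ofList_cons]
      refine List.pairwise_cons.mpr ⟨?_, ?_⟩
      · intro b hb
        obtain ⟨hb1, hb2⟩ := (PySem.Set.mem_discard _ _ _).mp hb
        have hbr : b ∈ r' := ((PySem.Set.mem_ofList _ _).mp hb1)
        rw [PySem.Dict.getD_insert_self, PySem.Dict.getD_insert_of_ne _ _ _ hb2]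
        exact ih.1 b hbr
      · have hsub : ((PySem.Set.ofList r').discard x).Sublist (PySem.Set.ofList r') := by
          rw [PySem.Set.discard]; exact List.filter_sublist
        have hp := ih.2
        rw [PySem.List.dedup_eq_ofList] at hp
        refine List.Pairwise.imp_of_mem ?_ (hp.sublist hsub)
        intro a b ha hb hab
        have hax := ((PySem.Set.mem_discard _ _ _).mp ha).2
        have hbx := ((PySem.Set.mem_discard _ _ _).mp hb).2
        rw [PySem.Dict.getD_insert_of_ne _ _ _ hax, PySem.Dict.getD_insert_of_ne _ _ _ hbx]
        exact hab

lemma pvOrder_nodup (fi : List String) : (pvOrder fi).Nodup := by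
  rw [pvOrder]
  exact List.nodup_reverse.mpr (PySem.List.nodup_dedup fi.reverse)

lemma pvMem_order (fi : List String) (g : String) : g ∈ pvOrder fi ↔ g ∈ fi := by
  rw [pvOrder]
  simp

-- order_dict values strictly increase along B's order list
lemma pvOrder_pairwise (fi : List String) :
    (pvOrder fi).Pairwise (fun a b => (pvOdict fi).getD a 0 < (pvOdict fi).getD b 0) := by
  have h := (pvOdict_rev fi.reverse).2
  rw [List.reverse_reverse] at h
  rw [pvOrder, List.pairwise_reverse]
  exact h

-- adding one fresh element to a filter over a nodup list, as a permutation
lemma pvFilter_or_perm (l : List String) (P : String → Bool) (j : String)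
    (hnd : l.Nodup) (hj : j ∈ l) (hPj : P j = false) :
    (l.filter (fun g => P g || (g == j))).Perm (l.filter P ++ [j]) := by
  induction l with
  | nil => cases hj
  | cons x l' ih =>
    obtain ⟨hxnotin, hnd'⟩ := List.nodup_cons.mp hnd
    rcases List.mem_cons.mp hj with rfl | hjl'
    · have h1 : l'.filter (fun g => P g || (g == j)) = l'.filter P := by
        apply List.filter_congr; intro g hg
        have hgj : g ≠ j := fun h => hxnotin (h ▸ hg)
        simp [hgj]
      simp only [List.filter_cons, BEq.rfl, Bool.or_true, if_true]
      rw [h1, if_neg (by simp [hPj])]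
      exact (List.perm_append_singleton _ _).symm
    · have hxj : x ≠ j := by rintro rfl; exact hxnotin hjl'
      have hbeq : (x == j) = false := by simp [hxj]
      simp only [List.filter_cons, hbeq, Bool.or_false]
      by_cases hPx : P x = true
      · rw [if_pos hPx, if_pos hPx, List.cons_append]
        exact (ih hnd' hjl').cons x
      · have hPx' : P x = false := by simpa using hPx
        rw [if_neg (by simp [hPx']), if_neg (by simp [hPx'])]
        exact ih hnd' hjl'

-- the invariant of A's inner loop: temp_dict's items are B's order list filtered by the
-- items seen so far, each paired with its order_dict value
lemma pvInner (fi : List String) (t : List String) (P : String → Bool)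
    (td : PySem.Dict String Int)
    (htd : td.items = ((pvOrder fi).filter P).map (fun g => (g, (pvOdict fi).getD g 0))) :
    (t.foldl (fun td j =>
        if fi.contains j then
          PySem.Dict.ofList
            (PySem.List.sorted (td.insert j ((pvOdict fi).getD j 0)).items (fun p => p.2))
        else td) td).items
      = ((pvOrder fi).filter (fun g => P g || t.contains g)).map
          (fun g => (g, (pvOdict fi).getD g 0)) := by
  induction t generalizing P td with
  | nil => simpa using htd
  | cons j t' ih =>
    simp only [List.foldl_cons]
    by_cases hfi : fi.contains j = true
    · have hjfi : j ∈ fi := by simpa using hfi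
      have hjO : j ∈ pvOrder fi := (pvMem_order fi j).mpr hjfi
      rw [if_pos hfi]
      by_cases hPj : P j = true
      · -- j is already a key with the same value: insert and sort change nothing
        have hcont : td.contains j = true := by
          rw [PySem.Dict.contains_iff_mem_keys, PySem.Dict.keys, htd, List.map_map]
          simp only [Function.comp_def]
          simpa using List.mem_filter.mpr ⟨hjO, hPj⟩
        have hins : (td.insert j ((pvOdict fi).getD j 0)).items = td.items := by
          rw [PySem.Dict.items_insert_of_contains td _ hcont, htd, List.map_map]
          apply List.map_congr_left
          intro g hg
          by_cases hgj : g = j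
          · subst hgj; simp
          · simp [hgj]
        have hpwle : (td.items).Pairwise (fun p q => p.2 ≤ q.2) := by
          rw [htd, List.pairwise_map]
          exact (List.Pairwise.sublist (List.filter_sublist) (pvOrder_pairwise fi)).imp le_of_lt
        have hofl : (PySem.Dict.ofList (PySem.List.sorted
            (td.insert j ((pvOdict fi).getD j 0)).items (fun p => p.2))).items = td.items := by
          rw [hins, PySem.List.sorted_eq_self_of_pairwise _ _ hpwle]
          apply pvItems_ofList
          rw [htd, List.map_map]
          simp only [Function.comp_def]
          simpa using ((pvOrder_nodup fi).filter P)
        rw [ih P _ (hofl.trans htd)]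
        apply congrArg
        apply List.filter_congr
        intro g hg
        by_cases hgj : g = j
        · subst hgj; simp [hPj]
        · simp [hgj]
      · -- j is a new key: insert appends, sorting moves it to its place
        have hPj' : P j = false := by simpa using hPj
        have hcont : td.contains j = false := by
          rw [← Bool.not_eq_true, PySem.Dict.contains_iff_mem_keys, PySem.Dict.keys, htd,
            List.map_map]
          simp only [Function.comp_def]
          intro hmem
          have : P j = true := (List.mem_filter.mp (by simpa using hmem)).2
          simp [hPj'] at this
        have hins : (td.insert j ((pvOdict fi).getD j 0)).items
            = (((pvOrder fi).filter P) ++ [j]).map (fun g => (g, (pvOdict fi).getD g 0)) := by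
          rw [PySem.Dict.items_insert_of_not_contains td _ hcont, htd, List.map_append,
            List.map_cons, List.map_nil]
        have hperm := (pvFilter_or_perm (pvOrder fi) P j (pvOrder_nodup fi) hjO hPj').map
          (fun g => (g, (pvOdict fi).getD g 0))
        have hpwlt : (((pvOrder fi).filter (fun g => P g || (g == j))).map
            (fun g => (g, (pvOdict fi).getD g 0))).Pairwise (fun p q => p.2 < q.2) := by
          rw [List.pairwise_map]
          exact List.Pairwise.sublist (List.filter_sublist) (pvOrder_pairwise fi)
        have hofl : (PySem.Dict.ofList (PySem.List.sorted
            (td.insert j ((pvOdict fi).getD j 0)).items (fun p => p.2))).items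
            = ((pvOrder fi).filter (fun g => P g || (g == j))).map
                (fun g => (g, (pvOdict fi).getD g 0)) := by
          rw [hins, PySem.List.sorted_eq_of_perm_of_pairwise_lt _ _ _ hperm hpwlt]
          apply pvItems_ofList
          rw [List.map_map]
          simp only [Function.comp_def]
          simpa using ((pvOrder_nodup fi).filter (fun g => P g || (g == j)))
        rw [ih (fun g => P g || (g == j)) _ hofl]
        apply congrArg
        apply List.filter_congr
        intro g hg
        by_cases hgj : g = j
        · subst hgj; simp [hPj']
        · have hb : (g == j) = false := beq_eq_false_iff_ne.mpr hgj
          simp [hb, hgj]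
    · rw [if_neg hfi]
      rw [ih P td htd]
      apply congrArg
      apply List.filter_congr
      intro g hg
      have hgfi : g ∈ fi := (pvMem_order fi g).mp hg
      have hgj : ¬ g = j := by rintro rfl; exact hfi (by simpa using hgfi)
      simp [hgj]

-- ===== VERDICT (by name: the statement is the Claim_ definition above) =====
theorem sort_and_cut_transactions_spec : Claim_equal_sort_and_cut_transactions := by
  intro transactions fi _
  unfold Spec_sort_and_cut_transactions
  unfold sort_and_cut_transactions sort_and_cut_transactions_alt
  rw [PySem.List.foldl_append_singleton_eq_map, PySem.List.foldl_append_singleton_eq_map]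
  simp only [List.nil_append]
  apply List.map_congr_left
  intro t _
  have h := pvInner fi t (fun _ => false) PySem.Dict.empty (by simp [PySem.Dict.empty])
  rw [pvOdict] at h
  rw [PySem.Dict.keys, h, List.map_map]
  simp only [Function.comp_def, Bool.false_or]
  rw [pvOrder]
  simp only [List.map_id']
  apply List.filter_congr
  intro g hg
  simp [PySem.Set.contains]
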